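-- pv_equiv track=rewrite | github.com/wankhadenitin56/bioxcel | gliner_model_news.py | post_process_relations
-- ===== SOURCE A (Python) =====
-- from typing import List, Dict, Set
--
-- def post_process_relations(relations: Set[str], original_text: str) -> Set[str]:
--     """
--     Post-process relations to correct common misclassifications
--     """
--     corrected_relations = set()
--     text_lower = original_text.lower()
--
--     for relation in relations:
--         parts = relation.split(' -> ')
--         if len(parts) != 3:
--             continue
--
--         entity1, rel_type, entity2 = [part.strip() for part in parts]
--
--         # Check if this should be "approved_for" instead of "associated_with" or "treats"
--         if rel_type in ['associated_with', 'treats']: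
--             # Look for approval context in the original text
--             approval_indicators = [
--                 'approved for', 'approved in', 'was approved', 'approval for',
--                 'licensed for', 'authorization for', 'indicated for'
--             ]
--
--             entity1_lower = entity1.lower()
--             entity2_lower = entity2.lower()
--
--             # Find sentences containing both entities
--             sentences = text_lower.split('.')
--             for sentence in sentences:
--                 if entity1_lower in sentence and entity2_lower in sentence:
--                     # Check if approval language is present
--                     if any(indicator in sentence for indicator in approval_indicators):
--                         corrected_relations.add(f"{entity1} -> approved_for -> {entity2}")
--                         break
--             else:
--                 # No approval context found, keep original relation
--                 corrected_relations.add(relation)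
--         else:
--             # Keep other relation types as is
--             corrected_relations.add(relation)
--
--     return corrected_relations
-- ===== SOURCE B (Python) =====
-- def post_process_relations(relations, original_text):
--     approval_indicators = [
--         'approved for', 'approved in', 'was approved', 'approval for',
--         'licensed for', 'authorization for', 'indicated for'
--     ]
--     text_lower = original_text.lower()
--     # Precompute the sentences that carry approval language, once.
--     approval_sentences = [s for s in text_lower.split('.')
--                           if any(ind in s for ind in approval_indicators)]
--     corrected = set()
--     for relation in relations:
--         parts = [p.strip() for p in relation.split(' -> ')]
--         if len(parts) != 3:
--             continue
--         e1, rel_type, e2 = parts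
--         if rel_type in ('associated_with', 'treats') and any(
--                 e1.lower() in s and e2.lower() in s for s in approval_sentences):
--             corrected.add(f"{e1} -> approved_for -> {e2}")
--         else:
--             corrected.add(relation)
--     return corrected
-- ===== Notes on version B (the rewrite author's own statement) =====
-- stated objective: alternative
-- what changed: B splits the text into sentences once and precomputes the list of approval-indicator-bearing sentences, reducing the per-relation work to entity-containment tests against that list, instead of A's per-relation text re-split and interleaved entity-then-indicator for/else/break scan over all sentences.
import Mathlib
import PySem

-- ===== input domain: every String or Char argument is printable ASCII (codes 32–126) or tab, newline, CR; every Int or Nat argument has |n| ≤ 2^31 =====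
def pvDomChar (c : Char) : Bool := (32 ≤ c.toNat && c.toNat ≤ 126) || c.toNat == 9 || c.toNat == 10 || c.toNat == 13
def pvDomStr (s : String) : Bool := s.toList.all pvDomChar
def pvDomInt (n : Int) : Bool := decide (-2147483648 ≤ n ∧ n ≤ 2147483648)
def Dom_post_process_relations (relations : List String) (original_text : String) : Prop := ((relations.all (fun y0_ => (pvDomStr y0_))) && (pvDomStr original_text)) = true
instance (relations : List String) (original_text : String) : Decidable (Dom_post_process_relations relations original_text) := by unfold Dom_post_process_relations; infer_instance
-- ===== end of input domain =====

-- B precomputes the list of approval-bearing sentences once and tests each relation's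
-- entities against it, instead of A's per-relation sentence re-scan with for/else/break.
-- (A mutates nothing; equality is about the returned set, held as a PySem.Set list.)

-- s.split(sep) for the NONEMPTY literal seps used below; split? is none only for sep = ""
def pvSplit (s sep : String) : List String := (PySem.Str.split? s sep).getD []

-- ===== PORT A =====
def pvIndicatorsA : List String :=
  ["approved for", "approved in", "was approved", "approval for",
   "licensed for", "authorization for", "indicated for"]

-- A's inner 'for sentence in sentences: ... break / else:' -- returns true iff the break fired
def pvScanA (e1 e2 : String) : List String → Bool
  | [] => false
  | s :: rest =>
    if PySem.Str.isIn e1 s && PySem.Str.isIn e2 s then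
      if pvIndicatorsA.any (fun ind => PySem.Str.isIn ind s) then true
      else pvScanA e1 e2 rest
    else pvScanA e1 e2 rest

-- A's loop body over one relation (text_lower passed in; sentences re-split per relation, as in A)
def pvStepA (text_lower : String) (corrected : List String) (relation : String) : List String :=
  let parts := pvSplit relation " -> "
  if parts.length ≠ 3 then corrected
  else
    let stripped := parts.map PySem.Str.strip
    let e1 := stripped.getD 0 ""
    let rel_type := stripped.getD 1 ""
    let e2 := stripped.getD 2 ""
    if rel_type = "associated_with" ∨ rel_type = "treats" then
      let sentences := pvSplit text_lower "."
      if pvScanA (PySem.Str.lower e1) (PySem.Str.lower e2) sentences then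
        PySem.Set.add corrected (PySem.Str.join "" [e1, " -> approved_for -> ", e2])
      else PySem.Set.add corrected relation
    else PySem.Set.add corrected relation

def post_process_relations (relations : List String) (original_text : String) : List String :=
  relations.foldl (pvStepA (PySem.Str.lower original_text)) []

-- ===== PORT B =====
def pvIndicatorsB : List String :=
  ["approved for", "approved in", "was approved", "approval for",
   "licensed for", "authorization for", "indicated for"]

def pvApprovalSentences (text_lower : String) : List String :=
  (pvSplit text_lower ".").filter
    (fun s => pvIndicatorsB.any (fun ind => PySem.Str.isIn ind s))

-- B's loop body: only entity-containment tests against the precomputed approval sentences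
def pvStepB (approval : List String) (corrected : List String) (relation : String) : List String :=
  match (pvSplit relation " -> ").map PySem.Str.strip with
  | [e1, rel_type, e2] =>
    if (rel_type = "associated_with" ∨ rel_type = "treats") ∧
       approval.any (fun s =>
         PySem.Str.isIn (PySem.Str.lower e1) s && PySem.Str.isIn (PySem.Str.lower e2) s) then
      PySem.Set.add corrected (PySem.Str.join "" [e1, " -> approved_for -> ", e2])
    else PySem.Set.add corrected relation
  | _ => corrected

def post_process_relations_alt (relations : List String) (original_text : String) : List String :=
  relations.foldl (pvStepB (pvApprovalSentences (PySem.Str.lower original_text))) []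

-- ===== PRECONDITION & SPEC =====
def Spec_post_process_relations (relations : List String) (original_text : String) (out : List String) : Prop := out = post_process_relations_alt relations original_text
instance (relations : List String) (original_text : String) (out : List String) : Decidable (Spec_post_process_relations relations original_text out) := by unfold Spec_post_process_relations; infer_instance

-- ===== CLAIM (what is proved, stated in full; the proofs are below) =====
def Claim_equal_post_process_relations : Prop := ∀ (relations : List String) (original_text : String), Dom_post_process_relations relations original_text → Spec_post_process_relations relations original_text (post_process_relations relations original_text)

-- ===== LEMMAS AND PROOFS =====

-- A's break-scan equals "some approval-bearing sentence contains both entities"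
theorem pvScanA_eq_filter_any (e1 e2 : String) (sentences : List String) :
    pvScanA e1 e2 sentences =
      (sentences.filter (fun s => pvIndicatorsB.any (fun ind => PySem.Str.isIn ind s))).any
        (fun s => PySem.Str.isIn e1 s && PySem.Str.isIn e2 s) := by
  induction sentences with
  | nil => rfl
  | cons s rest ih =>
    have hind : pvIndicatorsA = pvIndicatorsB := rfl
    rw [pvScanA, hind, List.filter_cons]
    by_cases hbe : (PySem.Str.isIn e1 s && PySem.Str.isIn e2 s) = true <;>
      by_cases hi : (pvIndicatorsB.any fun ind => PySem.Str.isIn ind s) = true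
    · rw [if_pos hbe, if_pos hi, if_pos hi, List.any_cons, hbe]; simp
    · rw [if_pos hbe, if_neg hi, if_neg hi]; exact ih
    · rw [if_neg hbe, if_pos hi, List.any_cons, eq_false_of_ne_true hbe]; simpa using ih
    · rw [if_neg hbe, if_neg hi]; exact ih

-- the two per-relation step functions agree
theorem pv_step_eq (text_lower : String) (corrected : List String) (relation : String) :
    pvStepA text_lower corrected relation
      = pvStepB (pvApprovalSentences text_lower) corrected relation := by
  rw [pvStepA, pvStepB]
  rcases h : pvSplit relation " -> " with _ | ⟨a, _ | ⟨b, _ | ⟨c, _ | ⟨d, t⟩⟩⟩⟩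
  · simp
  · simp
  · simp
  · simp only [List.length_cons, List.length_nil, List.map_cons, List.map_nil]
    by_cases hr : (PySem.Str.strip b = "associated_with" ∨ PySem.Str.strip b = "treats") <;>
      simp [hr, pvApprovalSentences, pvScanA_eq_filter_any]
  · simp

-- ===== VERDICT (by name: the statement is the Claim_ definition above) =====
theorem post_process_relations_spec : Claim_equal_post_process_relations := by
  intro relations original_text hdom
  clear hdom
  show post_process_relations relations original_text = post_process_relations_alt relations original_text
  rw [post_process_relations, post_process_relations_alt]
  induction relations using List.reverseRecOn with
  | nil => rfl
  | append_singleton xs x ih =>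
      rw [List.foldl_append, List.foldl_append, ih, List.foldl_cons, List.foldl_cons,
          List.foldl_nil, List.foldl_nil, pv_step_eq]
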